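-- pv_equiv track=rewrite | github.com/PGE323M/assignment4-gg29837 | assignment4.py | pentadiagonal
-- ===== SOURCE A (Python) =====
-- def find_neighbors(index, Nx, Ny):
--     # initialize data to store the neighbor pairs
--     neighbors = []
--
--     # establish column and row of indexed k values
--     column = index % Nx
--     row = index // Nx
--
--     # Check left neighbor
--     if column > 0:
--          neighbors.append(index - 1)
--         # Check right neighbor
--     if column < Nx - 1:
--         neighbors.append(index + 1)
--         # Check bottom neighbor
--     if row > 0:
--         neighbors.append(index - Nx)
--         # Check top neighbor
--     if row < Ny - 1:
--         neighbors.append(index + Nx)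
--
--     return neighbors, len(neighbors)
--
-- def pentadiagonal(Nx, Ny):
--     ## Begin by initializing the matrix (A) with N rows and N columns of zeros. N = Nx * Ny
--     A = [[0 for i in range(Nx*Ny)] for i in range(Nx*Ny)]   # Creates matrix and assigns all matrix values to zero
--
--     # Loop through each gridblock
--     for i in range(Nx*Ny):
--         # Call find_neighbors function
--         neighbors, num_of_neighbors = find_neighbors(i, Nx, Ny)
--         A[i][i] = num_of_neighbors
--
--         for j in neighbors:
--             A[i][j] = -1
--
--     return A
-- ===== SOURCE B (Python) =====
-- def pentadiagonal(Nx, Ny):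
--     N = Nx * Ny
--     A = [[0] * N for _ in range(N)]
--     # one symmetric write per grid edge: each node's diagonal accumulates its degree
--     for i in range(N):
--         column = i % Nx
--         row = i // Nx
--         if column < Nx - 1:          # edge to right neighbor
--             j = i + 1
--             A[i][j] = -1
--             A[j][i] = -1
--             A[i][i] += 1
--             A[j][j] += 1
--         if row < Ny - 1:             # edge to top neighbor
--             j = i + Nx
--             A[i][j] = -1
--             A[j][i] = -1
--             A[i][i] += 1
--             A[j][j] += 1
--     return A
-- ===== Notes on version B (the rewrite author's own statement) =====
-- stated objective: simpler
-- what changed: B drops the find_neighbors helper and the per-node 4-way neighbor gathering: it walks each grid edge once (right and top neighbor of each node), writing -1 symmetrically and accumulating each node's degree on the diagonal by incrementing both endpoints.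
import Mathlib
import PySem

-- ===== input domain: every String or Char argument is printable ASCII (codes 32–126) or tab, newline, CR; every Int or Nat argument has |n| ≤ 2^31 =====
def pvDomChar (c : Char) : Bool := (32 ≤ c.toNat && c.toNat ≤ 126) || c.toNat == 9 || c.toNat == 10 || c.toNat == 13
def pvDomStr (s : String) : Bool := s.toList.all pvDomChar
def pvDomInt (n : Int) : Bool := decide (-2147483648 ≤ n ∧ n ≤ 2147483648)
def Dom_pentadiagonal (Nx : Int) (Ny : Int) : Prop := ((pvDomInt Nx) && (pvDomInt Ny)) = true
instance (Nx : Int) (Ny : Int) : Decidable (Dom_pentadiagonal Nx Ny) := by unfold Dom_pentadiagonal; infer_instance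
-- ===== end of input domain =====

-- B replaces A's per-node neighbor gathering (find_neighbors) by one symmetric write per
-- grid edge, accumulating each diagonal entry as the node's degree; same output, no helper.

-- ===== PORT A =====
def findNeighbors (index : Int) (Nx : Int) (Ny : Int) : List Int × Int :=
  let neighbors : List Int := []
  let column := PySem.Int.mod index Nx
  let row := PySem.Int.floordiv index Nx
  let neighbors := if column > 0 then neighbors ++ [index - 1] else neighbors
  let neighbors := if column < Nx - 1 then neighbors ++ [index + 1] else neighbors
  let neighbors := if row > 0 then neighbors ++ [index - Nx] else neighbors
  let neighbors := if row < Ny - 1 then neighbors ++ [index + Nx] else neighbors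
  (neighbors, (neighbors.length : Int))

def pentadiagonal (Nx : Int) (Ny : Int) : List (List Int) :=
  let A : List (List Int) :=
    (PySem.List.pyRange 0 (Nx*Ny)).map (fun _ => (PySem.List.pyRange 0 (Nx*Ny)).map (fun _ => (0 : Int)))
  (PySem.List.pyRange 0 (Nx*Ny)).foldl (fun A i =>
    let nn := findNeighbors i Nx Ny
    let A := PySem.List.pySetD A i (PySem.List.pySetD (PySem.List.pyGetD A i []) i nn.2)
    nn.1.foldl (fun A j =>
      PySem.List.pySetD A i (PySem.List.pySetD (PySem.List.pyGetD A i []) j (-1))) A) A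

-- ===== PORT B =====
def pentadiagonal_alt (Nx : Int) (Ny : Int) : List (List Int) :=
  let A : List (List Int) :=
    (PySem.List.pyRange 0 (Nx*Ny)).map (fun _ => PySem.List.pyRepeat [(0 : Int)] (Nx*Ny))
  (PySem.List.pyRange 0 (Nx*Ny)).foldl (fun A i =>
    let column := PySem.Int.mod i Nx
    let row := PySem.Int.floordiv i Nx
    let A :=
      if column < Nx - 1 then
        let j := i + 1
        let A := PySem.List.pySetD A i (PySem.List.pySetD (PySem.List.pyGetD A i []) j (-1))
        let A := PySem.List.pySetD A j (PySem.List.pySetD (PySem.List.pyGetD A j []) i (-1))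
        let A := PySem.List.pySetD A i (PySem.List.pySetD (PySem.List.pyGetD A i []) i
                   (PySem.List.pyGetD (PySem.List.pyGetD A i []) i 0 + 1))
        let A := PySem.List.pySetD A j (PySem.List.pySetD (PySem.List.pyGetD A j []) j
                   (PySem.List.pyGetD (PySem.List.pyGetD A j []) j 0 + 1))
        A
      else A
    if row < Ny - 1 then
      let j := i + Nx
      let A := PySem.List.pySetD A i (PySem.List.pySetD (PySem.List.pyGetD A i []) j (-1))
      let A := PySem.List.pySetD A j (PySem.List.pySetD (PySem.List.pyGetD A j []) i (-1))
      let A := PySem.List.pySetD A i (PySem.List.pySetD (PySem.List.pyGetD A i []) i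
                 (PySem.List.pyGetD (PySem.List.pyGetD A i []) i 0 + 1))
      let A := PySem.List.pySetD A j (PySem.List.pySetD (PySem.List.pyGetD A j []) j
                 (PySem.List.pyGetD (PySem.List.pyGetD A j []) j 0 + 1))
      A
    else A) A

-- ===== PRECONDITION & SPEC =====
def Spec_pentadiagonal (Nx : Int) (Ny : Int) (out : List (List Int)) : Prop := out = pentadiagonal_alt Nx Ny
instance (Nx : Int) (Ny : Int) (out : List (List Int)) : Decidable (Spec_pentadiagonal Nx Ny out) := by unfold Spec_pentadiagonal; infer_instance

-- ===== CLAIM (what is proved, stated in full; the proofs are below) =====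
def Claim_equal_pentadiagonal : Prop := ∀ (Nx : Int) (Ny : Int), Dom_pentadiagonal Nx Ny → Spec_pentadiagonal Nx Ny (pentadiagonal Nx Ny)

-- ===== LEMMAS AND PROOFS =====

-- the common pointwise description: an N×N matrix given by a function of the two indices
def mkM (N : Nat) (g : Nat → Nat → Int) : List (List Int) :=
  (List.range N).map (fun a => (List.range N).map (fun b => g a b))

-- the closed-form entry both loops produce (phrased through A's neighbor list)
def entryA (Nx Ny : Int) (a b : Nat) : Int :=
  if ((b : Int)) ∈ (findNeighbors (a : Int) Nx Ny).1 then -1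
  else if b = a then (findNeighbors (a : Int) Nx Ny).2 else 0

lemma mkM_congr {N : Nat} {g h : Nat → Nat → Int}
    (he : ∀ a b, a < N → b < N → g a b = h a b) : mkM N g = mkM N h := by
  unfold mkM
  refine List.map_congr_left ?_
  intro a ha
  exact List.map_congr_left fun b hb =>
    he a b (List.mem_range.mp ha) (List.mem_range.mp hb)

lemma getD_mkM (N : Nat) (g : Nat → Nat → Int) (a : Nat) (ha : a < N) :
    PySem.List.pyGetD (mkM N g) (a : Int) [] = (List.range N).map (fun b => g a b) := by
  rw [PySem.List.pyGetD_natCast]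
  exact PySem.List.getD_map_range _ _ _ _ ha

lemma read_mkM (N : Nat) (g : Nat → Nat → Int) (a b : Nat) (ha : a < N) (hb : b < N) (d : Int) :
    PySem.List.pyGetD (PySem.List.pyGetD (mkM N g) (a : Int) []) (b : Int) d = g a b := by
  rw [getD_mkM N g a ha, PySem.List.pyGetD_natCast]
  exact PySem.List.getD_map_range _ _ _ _ hb

lemma set_mkM (N : Nat) (g : Nat → Nat → Int) (a b : Nat) (ha : a < N) (_hb : b < N) (v : Int) :
    PySem.List.pySetD (mkM N g) (a : Int)
      (PySem.List.pySetD (PySem.List.pyGetD (mkM N g) (a : Int) []) (b : Int) v)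
    = mkM N (fun x y => if x = a ∧ y = b then v else g x y) := by
  rw [getD_mkM N g a ha, PySem.List.pySetD_natCast, PySem.List.pySetD_natCast]
  apply List.ext_getElem
  · simp [mkM]
  · intro i h1 h2
    simp only [mkM, List.getElem_set, List.getElem_map, List.getElem_range] at *
    by_cases hia : i = a
    · subst hia
      simp only [if_true, true_and]
      apply List.ext_getElem
      · simp
      · intro j j1 j2
        simp only [List.length_set, List.length_map, List.length_range] at j1
        rw [List.getElem_set]
        split_ifs with h
        · simp_all
        · simp_all
          exact fun hh => absurd hh.symm h
    · rw [if_neg (by omega)]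
      apply List.ext_getElem <;> simp_all

-- ------- arithmetic about Python's // and % on the grid -------

lemma fd_bounds_pos (Nx Ny i : Int) (hNx : 0 < Nx) (h0 : 0 ≤ i) (h1 : i < Nx*Ny) :
    0 ≤ PySem.Int.floordiv i Nx ∧ PySem.Int.floordiv i Nx < Ny := by
  constructor
  · rw [PySem.Int.le_floordiv_iff_mul_le hNx]
    linarith
  · rw [PySem.Int.floordiv_lt_iff_lt_mul hNx]
    linarith [mul_comm Nx Ny]

lemma decomp_pos (Nx q c : Int) (hNx : 0 < Nx) (hc0 : 0 ≤ c) (hc1 : c < Nx) :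
    PySem.Int.mod (q*Nx + c) Nx = c ∧ PySem.Int.floordiv (q*Nx + c) Nx = q := by
  have h2 : PySem.Int.floordiv (q*Nx + c) Nx = q := by
    rw [PySem.Int.floordiv_eq_iff_of_pos hNx]
    constructor <;> nlinarith
  refine ⟨?_, h2⟩
  have := PySem.Int.floordiv_mul_add_mod (q*Nx + c) Nx
  rw [h2] at this
  linarith

lemma neg_conds (Nx Ny t : Int) (hNx : Nx < 0) (h0 : 0 ≤ t) (h1 : t < Nx*Ny) :
    ¬(0 < PySem.Int.mod t Nx) ∧ ¬(PySem.Int.mod t Nx < Nx - 1) ∧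
    ¬(0 < PySem.Int.floordiv t Nx) ∧ ¬(PySem.Int.floordiv t Nx < Ny - 1) := by
  obtain ⟨hmb1, hmb2⟩ := PySem.Int.mod_neg_bounds t hNx
  have hfd := PySem.Int.floordiv_mul_add_mod t Nx
  set q := PySem.Int.floordiv t Nx with hq
  set r := PySem.Int.mod t Nx with hr
  refine ⟨by omega, by omega, ?_, ?_⟩
  · intro hqpos
    nlinarith
  · intro hql
    nlinarith

lemma left_iff (Nx Ny t : Int) (hNx : 0 < Nx) (_hNy : 0 < Ny) (h0 : 0 ≤ t) (h1 : t < Nx*Ny) :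
    0 < PySem.Int.mod t Nx ↔ (1 ≤ t ∧ PySem.Int.mod (t - 1) Nx < Nx - 1) := by
  have hd := PySem.Int.floordiv_mul_add_mod t Nx
  have hm0 := PySem.Int.mod_nonneg t hNx
  have hm1 := PySem.Int.mod_lt t hNx
  obtain ⟨hr0, hr1⟩ := fd_bounds_pos Nx Ny t hNx h0 h1
  set q := PySem.Int.floordiv t Nx
  set c := PySem.Int.mod t Nx with hc
  constructor
  · intro hcpos
    have he : t - 1 = q*Nx + (c-1) := by linarith
    have hdec := decomp_pos Nx q (c-1) hNx (by omega) (by omega)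
    rw [← he] at hdec
    refine ⟨by nlinarith, ?_⟩
    rw [hdec.1]
    omega
  · rintro ⟨ht1, hrc⟩
    by_contra hc0
    have hq1 : 1 ≤ q := by nlinarith
    have he : t - 1 = (q-1)*Nx + (Nx-1) := by nlinarith
    have hdec := decomp_pos Nx (q-1) (Nx-1) hNx (by omega) (by omega)
    rw [← he] at hdec
    omega

lemma bottom_iff (Nx Ny t : Int) (hNx : 0 < Nx) (_hNy : 0 < Ny) (h0 : 0 ≤ t) (h1 : t < Nx*Ny) :
    0 < PySem.Int.floordiv t Nx ↔ (Nx ≤ t ∧ PySem.Int.floordiv (t - Nx) Nx < Ny - 1) := by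
  have hd := PySem.Int.floordiv_mul_add_mod t Nx
  have hm0 := PySem.Int.mod_nonneg t hNx
  have hm1 := PySem.Int.mod_lt t hNx
  obtain ⟨hr0, hr1⟩ := fd_bounds_pos Nx Ny t hNx h0 h1
  set q := PySem.Int.floordiv t Nx
  set c := PySem.Int.mod t Nx with hc
  constructor
  · intro hq
    have he : t - Nx = (q-1)*Nx + c := by nlinarith
    have hdec := decomp_pos Nx (q-1) c hNx (by omega) (by omega)
    rw [← he] at hdec
    refine ⟨by nlinarith, ?_⟩
    rw [hdec.2]
    omega
  · rintro ⟨ht1, -⟩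
    by_contra hq0
    nlinarith

-- ------- A's neighbor list, characterized -------

lemma mem_nbrs (Nx Ny t j : Int) :
    j ∈ (findNeighbors t Nx Ny).1 ↔
      (0 < PySem.Int.mod t Nx ∧ j = t - 1) ∨ (PySem.Int.mod t Nx < Nx - 1 ∧ j = t + 1) ∨
      (0 < PySem.Int.floordiv t Nx ∧ j = t - Nx) ∨ (PySem.Int.floordiv t Nx < Ny - 1 ∧ j = t + Nx) := by
  unfold findNeighbors
  dsimp only
  set m := PySem.Int.mod t Nx
  set f := PySem.Int.floordiv t Nx
  split_ifs <;> simp_all <;> omega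

lemma len_nbrs (Nx Ny t : Int) :
    (findNeighbors t Nx Ny).2 =
      (if 0 < PySem.Int.mod t Nx then 1 else 0) + (if PySem.Int.mod t Nx < Nx - 1 then 1 else 0) +
      (if 0 < PySem.Int.floordiv t Nx then 1 else 0) + (if PySem.Int.floordiv t Nx < Ny - 1 then 1 else 0) := by
  unfold findNeighbors
  dsimp only
  set m := PySem.Int.mod t Nx
  set f := PySem.Int.floordiv t Nx
  split_ifs <;> simp_all

lemma nbrs_range (Nx Ny t : Int) (h0 : 0 ≤ t) (h1 : t < Nx*Ny) :
    ∀ j ∈ (findNeighbors t Nx Ny).1, 0 ≤ j ∧ j < Nx*Ny := by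
  intro j hj
  rw [mem_nbrs] at hj
  have hpos : 0 < Nx*Ny := by omega
  rcases mul_pos_iff.mp hpos with ⟨hNx, hNy⟩ | ⟨hNx, hNy⟩
  · have hd := PySem.Int.floordiv_mul_add_mod t Nx
    have hm0 := PySem.Int.mod_nonneg t hNx
    have hm1 := PySem.Int.mod_lt t hNx
    obtain ⟨hr0, hr1⟩ := fd_bounds_pos Nx Ny t hNx h0 h1
    set q := PySem.Int.floordiv t Nx
    set c := PySem.Int.mod t Nx
    rcases hj with ⟨hc, rfl⟩ | ⟨hc, rfl⟩ | ⟨hc, rfl⟩ | ⟨hc, rfl⟩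
    · constructor <;> nlinarith
    · constructor <;> nlinarith
    · constructor <;> nlinarith
    · constructor <;> nlinarith
  · obtain ⟨n1, n2, n3, n4⟩ := neg_conds Nx Ny t hNx h0 h1
    tauto

lemma nbrs_neg (Nx Ny t : Int) (hNx : Nx < 0) (h0 : 0 ≤ t) (h1 : t < Nx*Ny) :
    (findNeighbors t Nx Ny).1 = [] ∧ (findNeighbors t Nx Ny).2 = 0 := by
  obtain ⟨n1, n2, n3, n4⟩ := neg_conds Nx Ny t hNx h0 h1
  unfold findNeighbors
  dsimp only
  rw [if_neg n1, if_neg n2, if_neg n3, if_neg n4]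
  simp

-- ------- the loop bodies of the two ports, named -------

def stepA (Nx Ny : Int) (A : List (List Int)) (i : Int) : List (List Int) :=
  let nn := findNeighbors i Nx Ny
  let A := PySem.List.pySetD A i (PySem.List.pySetD (PySem.List.pyGetD A i []) i nn.2)
  nn.1.foldl (fun A j =>
    PySem.List.pySetD A i (PySem.List.pySetD (PySem.List.pyGetD A i []) j (-1))) A

def stepB (Nx Ny : Int) (A : List (List Int)) (i : Int) : List (List Int) :=
  let column := PySem.Int.mod i Nx
  let row := PySem.Int.floordiv i Nx
  let A :=
    if column < Nx - 1 then
      let j := i + 1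
      let A := PySem.List.pySetD A i (PySem.List.pySetD (PySem.List.pyGetD A i []) j (-1))
      let A := PySem.List.pySetD A j (PySem.List.pySetD (PySem.List.pyGetD A j []) i (-1))
      let A := PySem.List.pySetD A i (PySem.List.pySetD (PySem.List.pyGetD A i []) i
                 (PySem.List.pyGetD (PySem.List.pyGetD A i []) i 0 + 1))
      let A := PySem.List.pySetD A j (PySem.List.pySetD (PySem.List.pyGetD A j []) j
                 (PySem.List.pyGetD (PySem.List.pyGetD A j []) j 0 + 1))
      A
    else A
  if row < Ny - 1 then
    let j := i + Nx
    let A := PySem.List.pySetD A i (PySem.List.pySetD (PySem.List.pyGetD A i []) j (-1))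
    let A := PySem.List.pySetD A j (PySem.List.pySetD (PySem.List.pyGetD A j []) i (-1))
    let A := PySem.List.pySetD A i (PySem.List.pySetD (PySem.List.pyGetD A i []) i
               (PySem.List.pyGetD (PySem.List.pyGetD A i []) i 0 + 1))
    let A := PySem.List.pySetD A j (PySem.List.pySetD (PySem.List.pyGetD A j []) j
               (PySem.List.pyGetD (PySem.List.pyGetD A j []) j 0 + 1))
    A
  else A

lemma pentadiagonal_eq_foldl (Nx Ny : Int) :
    pentadiagonal Nx Ny =
      (PySem.List.pyRange 0 (Nx*Ny)).foldl (stepA Nx Ny)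
        ((PySem.List.pyRange 0 (Nx*Ny)).map (fun _ => (PySem.List.pyRange 0 (Nx*Ny)).map (fun _ => (0 : Int)))) := rfl

lemma pentadiagonal_alt_eq_foldl (Nx Ny : Int) :
    pentadiagonal_alt Nx Ny =
      (PySem.List.pyRange 0 (Nx*Ny)).foldl (stepB Nx Ny)
        ((PySem.List.pyRange 0 (Nx*Ny)).map (fun _ => PySem.List.pyRepeat [(0 : Int)] (Nx*Ny))) := rfl

-- ------- A side: each iteration rewrites exactly its own row -------

lemma rowfold (N : Nat) (g : Nat → Nat → Int) (k : Nat) (hk : k < N) (ns : List Int)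
    (hns : ∀ j ∈ ns, 0 ≤ j ∧ j < (N : Int)) :
    ns.foldl (fun A j =>
        PySem.List.pySetD A (k : Int) (PySem.List.pySetD (PySem.List.pyGetD A (k : Int) []) j (-1)))
      (mkM N g)
    = mkM N (fun a b => if a = k ∧ ((b : Int)) ∈ ns then -1 else g a b) := by
  induction ns generalizing g with
  | nil => exact (mkM_congr (by intro a b _ _; simp)).symm
  | cons j rest ih =>
    obtain ⟨hj0, hjN⟩ := hns j (by simp)
    have hjc : ((j.toNat : Nat) : Int) = j := Int.toNat_of_nonneg hj0
    rw [List.foldl_cons]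
    rw [show j = ((j.toNat : Nat) : Int) from hjc.symm]
    rw [set_mkM N g k j.toNat hk (by omega) (-1)]
    rw [ih _ (fun x hx => hns x (by simp [hx]))]
    apply mkM_congr
    intro a b _ _
    simp only [List.mem_cons]
    by_cases hak : a = k
    · subst hak
      by_cases hbj : b = j.toNat
      · subst hbj
        simp
      · have hne : ¬ ((b : Int) = ((j.toNat : Nat) : Int)) := by exact_mod_cast hbj
        by_cases hbr : ((b : Int)) ∈ rest
        · simp [hbr]
        · simp only [hbr, or_false, true_and, and_false, if_false]
          rw [if_neg hbj, if_neg hne]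
    · simp [hak]

lemma stepA_mk (Nx Ny : Int) (N : Nat) (hNN : (N : Int) = Nx*Ny) (g : Nat → Nat → Int)
    (k : Nat) (hk : k < N) :
    stepA Nx Ny (mkM N g) (k : Int)
    = mkM N (fun a b =>
        if a = k ∧ ((b : Int)) ∈ (findNeighbors (k : Int) Nx Ny).1 then -1
        else if a = k ∧ b = k then (findNeighbors (k : Int) Nx Ny).2
        else g a b) := by
  unfold stepA
  dsimp only
  rw [set_mkM N g k k hk hk]
  have hr := nbrs_range Nx Ny (k : Int) (by positivity) (by rw [← hNN]; exact_mod_cast hk)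
  rw [rowfold N _ k hk _ (fun j hj => by
    obtain ⟨u, v⟩ := hr j hj
    exact ⟨u, by omega⟩)]

lemma A_fold (Nx Ny : Int) (N : Nat) (hNN : (N : Int) = Nx*Ny) (k : Nat) (hk : k ≤ N) :
    (List.range k).foldl (fun A n => stepA Nx Ny A ((n : Nat) : Int)) (mkM N (fun _ _ => 0))
    = mkM N (fun a b => if a < k then entryA Nx Ny a b else 0) := by
  induction k with
  | zero => exact (mkM_congr (by intro a b _ _; simp)).symm
  | succ k ih =>
    rw [List.range_succ, List.foldl_append, ih (by omega)]
    simp only [List.foldl_cons, List.foldl_nil]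
    rw [stepA_mk Nx Ny N hNN _ k (by omega)]
    apply mkM_congr
    intro a b _ _
    by_cases hak : a = k
    · subst hak
      unfold entryA
      by_cases hm : ((b : Int)) ∈ (findNeighbors ((a : Nat) : Int) Nx Ny).1
      · rw [if_pos ⟨rfl, hm⟩, if_pos (show a < a + 1 by omega), if_pos hm]
      · rw [if_neg (fun hc => hm hc.2), if_pos (show a < a + 1 by omega), if_neg hm]
        by_cases hb : b = a
        · rw [if_pos ⟨rfl, hb⟩, if_pos hb]
        · rw [if_neg (fun hc => hb hc.2), if_neg hb, if_neg (show ¬ a < a by omega)]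
    · have : ¬(a = k ∧ ((b : Int)) ∈ (findNeighbors (k : Int) Nx Ny).1) := by tauto
      rw [if_neg this, if_neg (by tauto)]
      by_cases h2 : a < k
      · rw [if_pos h2, if_pos (by omega)]
      · rw [if_neg h2, if_neg (by omega)]

lemma A_init (Nx Ny : Int) (N : Nat) (hNN : (N : Int) = Nx*Ny) :
    pentadiagonal Nx Ny
    = (List.range N).foldl (fun A n => stepA Nx Ny A ((n : Nat) : Int)) (mkM N (fun _ _ => 0)) := by
  rw [pentadiagonal_eq_foldl, show Nx*Ny = ((N : Nat) : Int) from hNN.symm,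
     PySem.List.pyRange_zero_natCast, List.foldl_map]
  congr 1
  simp [mkM, Function.comp_def, List.map_const']

lemma A_result (Nx Ny : Int) :
    pentadiagonal Nx Ny = mkM ((Nx*Ny).toNat) (entryA Nx Ny) := by
  by_cases h : Nx*Ny ≤ 0
  · rw [pentadiagonal_eq_foldl]
    rw [show PySem.List.pyRange 0 (Nx*Ny) = [] from by
      rw [PySem.List.pyRange_of_pos (a:=0) (b:=Nx*Ny) (s:=1) (by omega)]
      simp
      omega]
    simp [mkM, show (Nx*Ny).toNat = 0 from by omega]
  · rw [not_le] at h
    set N := (Nx*Ny).toNat with hN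
    have hNN : (N : Int) = Nx*Ny := by omega
    rw [A_init Nx Ny N hNN, A_fold Nx Ny N hNN N (le_refl N)]
    exact mkM_congr (fun a b ha _ => if_pos ha)

-- ------- B side -------

-- the state of one diagonal/off-diagonal cell after B's first k iterations
def gB (Nx Ny : Int) (k : Nat) (a b : Nat) : Int :=
  if a = b then
    (if (a : Int) < (k : Int) then
        (if PySem.Int.mod (a : Int) Nx < Nx - 1 then 1 else 0) +
        (if PySem.Int.floordiv (a : Int) Nx < Ny - 1 then 1 else 0) else 0) +
    (if (a : Int) - 1 < (k : Int) then (if 0 < PySem.Int.mod (a : Int) Nx then 1 else 0) else 0) +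
    (if (a : Int) - Nx < (k : Int) then (if 0 < PySem.Int.floordiv (a : Int) Nx then 1 else 0) else 0)
  else if min a b < k then entryA Nx Ny a b else 0

-- one edge update of the cell function: write -1 symmetrically, bump both diagonals
def eUpd (g : Nat → Nat → Int) (i j : Nat) : Nat → Nat → Int := fun a b =>
  if a = i ∧ b = i then g i i + 1
  else if a = j ∧ b = j then g j j + 1
  else if (a = i ∧ b = j) ∨ (a = j ∧ b = i) then -1
  else g a b

def stepG (Nx Ny : Int) (k : Nat) (g : Nat → Nat → Int) : Nat → Nat → Int :=
  let g1 := if PySem.Int.mod (k : Int) Nx < Nx - 1 then eUpd g k (k+1) else g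
  if PySem.Int.floordiv (k : Int) Nx < Ny - 1 then eUpd g1 k (k + Nx.toNat) else g1

lemma ite_lt_succ (x K X : Int) :
    (if x < K + 1 then X else 0) = (if x < K then X else 0) + (if x = K then X else 0) := by
  split_ifs <;> omega

lemma ite_eq_shift (x c K X : Int) :
    (if x - c = K then X else 0) = (if x = K + c then X else 0) := by
  split_ifs <;> omega

lemma right_range (Nx Ny t : Int) (hNx : 0 < Nx) (_hNy : 0 < Ny) (h0 : 0 ≤ t) (h1 : t < Nx*Ny)
    (hc : PySem.Int.mod t Nx < Nx - 1) : t + 1 < Nx*Ny := by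
  have hd := PySem.Int.floordiv_mul_add_mod t Nx
  obtain ⟨hr0, hr1⟩ := fd_bounds_pos Nx Ny t hNx h0 h1
  nlinarith

lemma top_range (Nx Ny t : Int) (hNx : 0 < Nx) (_hNy : 0 < Ny) (h0 : 0 ≤ t) (h1 : t < Nx*Ny)
    (hc : PySem.Int.floordiv t Nx < Ny - 1) : t + Nx < Nx*Ny := by
  have hd := PySem.Int.floordiv_mul_add_mod t Nx
  have hm1 := PySem.Int.mod_lt t hNx
  obtain ⟨hr0, _⟩ := fd_bounds_pos Nx Ny t hNx h0 h1
  nlinarith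

lemma edge_mk (N : Nat) (g : Nat → Nat → Int) (i j : Nat) (hi : i < N) (hj : j < N)
    (hij : i ≠ j) :
    PySem.List.pySetD
      (PySem.List.pySetD
        (PySem.List.pySetD
          (PySem.List.pySetD (mkM N g) (i : Int)
            (PySem.List.pySetD (PySem.List.pyGetD (mkM N g) (i : Int) []) (j : Int) (-1)))
          (j : Int)
          (PySem.List.pySetD
            (PySem.List.pyGetD
              (PySem.List.pySetD (mkM N g) (i : Int)
                (PySem.List.pySetD (PySem.List.pyGetD (mkM N g) (i : Int) []) (j : Int) (-1)))
              (j : Int) []) (i : Int) (-1)))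
        (i : Int) ((fun A => PySem.List.pySetD (PySem.List.pyGetD A (i : Int) []) (i : Int)
            (PySem.List.pyGetD (PySem.List.pyGetD A (i : Int) []) (i : Int) 0 + 1))
          (PySem.List.pySetD
            (PySem.List.pySetD (mkM N g) (i : Int)
              (PySem.List.pySetD (PySem.List.pyGetD (mkM N g) (i : Int) []) (j : Int) (-1)))
            (j : Int)
            (PySem.List.pySetD
              (PySem.List.pyGetD
                (PySem.List.pySetD (mkM N g) (i : Int)
                  (PySem.List.pySetD (PySem.List.pyGetD (mkM N g) (i : Int) []) (j : Int) (-1)))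
                (j : Int) []) (i : Int) (-1)))))
      (j : Int) ((fun A => PySem.List.pySetD (PySem.List.pyGetD A (j : Int) []) (j : Int)
          (PySem.List.pyGetD (PySem.List.pyGetD A (j : Int) []) (j : Int) 0 + 1))
        (PySem.List.pySetD
          (PySem.List.pySetD
            (PySem.List.pySetD (mkM N g) (i : Int)
              (PySem.List.pySetD (PySem.List.pyGetD (mkM N g) (i : Int) []) (j : Int) (-1)))
            (j : Int)
            (PySem.List.pySetD
              (PySem.List.pyGetD
                (PySem.List.pySetD (mkM N g) (i : Int)
                  (PySem.List.pySetD (PySem.List.pyGetD (mkM N g) (i : Int) []) (j : Int) (-1)))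
                (j : Int) []) (i : Int) (-1)))
          (i : Int) ((fun A => PySem.List.pySetD (PySem.List.pyGetD A (i : Int) []) (i : Int)
              (PySem.List.pyGetD (PySem.List.pyGetD A (i : Int) []) (i : Int) 0 + 1))
            (PySem.List.pySetD
              (PySem.List.pySetD (mkM N g) (i : Int)
                (PySem.List.pySetD (PySem.List.pyGetD (mkM N g) (i : Int) []) (j : Int) (-1)))
              (j : Int)
              (PySem.List.pySetD
                (PySem.List.pyGetD
                  (PySem.List.pySetD (mkM N g) (i : Int)
                    (PySem.List.pySetD (PySem.List.pyGetD (mkM N g) (i : Int) []) (j : Int) (-1)))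
                  (j : Int) []) (i : Int) (-1))))))
    = mkM N (eUpd g i j) := by
  have hji : j ≠ i := Ne.symm hij
  rw [set_mkM N g i j hi hj]
  rw [set_mkM N _ j i hj hi]
  beta_reduce
  rw [read_mkM N _ i i hi hi]
  rw [set_mkM N _ i i hi hi]
  rw [read_mkM N _ j j hj hj]
  rw [set_mkM N _ j j hj hj]
  apply mkM_congr
  intro x y _ _
  by_cases e1 : x = i ∧ y = i
  · obtain ⟨rfl, rfl⟩ := e1
    simp [eUpd, hij]
  · by_cases e2 : x = j ∧ y = j
    · obtain ⟨rfl, rfl⟩ := e2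
      simp [eUpd, hji]
    · by_cases e3 : x = i ∧ y = j
      · obtain ⟨rfl, rfl⟩ := e3
        simp [eUpd, hij, hji]
      · by_cases e4 : x = j ∧ y = i
        · obtain ⟨rfl, rfl⟩ := e4
          simp [eUpd, hij, hji]
        · rw [if_neg e2, if_neg e1, if_neg e4, if_neg e3]
          unfold eUpd
          rw [if_neg e1, if_neg e2, if_neg (not_or.mpr ⟨e3, e4⟩)]

lemma stepB_mk (Nx Ny : Int) (N : Nat) (hNx : 0 < Nx) (hNy : 0 < Ny) (hNN : (N : Int) = Nx*Ny)
    (g : Nat → Nat → Int) (k : Nat) (hk : k < N) :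
    stepB Nx Ny (mkM N g) (k : Int) = mkM N (stepG Nx Ny k g) := by
  have hk0 : (0 : Int) ≤ (k : Int) := by positivity
  have hkN : ((k : Nat) : Int) < Nx*Ny := by rw [← hNN]; exact_mod_cast hk
  have h1 : ((k : Int)) + 1 = ((k+1 : Nat) : Int) := by push_cast; ring
  have h2 : ((k : Int)) + Nx = ((k + Nx.toNat : Nat) : Int) := by
    push_cast [Int.toNat_of_nonneg hNx.le]
    ring
  unfold stepB stepG
  dsimp only
  by_cases hr : PySem.Int.mod (k : Int) Nx < Nx - 1
  · have hr1 : k + 1 < N := by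
      have := right_range Nx Ny (k : Int) hNx hNy hk0 hkN hr
      omega
    rw [if_pos hr, if_pos hr, h1, edge_mk N g k (k+1) hk hr1 (by omega)]
    by_cases ht : PySem.Int.floordiv (k : Int) Nx < Ny - 1
    · have ht1 : k + Nx.toNat < N := by
        have := top_range Nx Ny (k : Int) hNx hNy hk0 hkN ht
        omega
      rw [if_pos ht, if_pos ht, h2,
         edge_mk N _ k (k + Nx.toNat) hk ht1 (by omega)]
    · rw [if_neg ht, if_neg ht]
  · rw [if_neg hr, if_neg hr]
    by_cases ht : PySem.Int.floordiv (k : Int) Nx < Ny - 1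
    · have ht1 : k + Nx.toNat < N := by
        have := top_range Nx Ny (k : Int) hNx hNy hk0 hkN ht
        omega
      rw [if_pos ht, if_pos ht, h2,
         edge_mk N g k (k + Nx.toNat) hk ht1 (by omega)]
    · rw [if_neg ht, if_neg ht]

lemma gB_diag (Nx Ny : Int) (k a : Nat) :
    gB Nx Ny k a a =
      (if (a : Int) < (k : Int) then
          (if PySem.Int.mod (a : Int) Nx < Nx - 1 then 1 else 0) +
          (if PySem.Int.floordiv (a : Int) Nx < Ny - 1 then 1 else 0) else 0) +
      (if (a : Int) - 1 < (k : Int) then (if 0 < PySem.Int.mod (a : Int) Nx then 1 else 0) else 0) +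
      (if (a : Int) - Nx < (k : Int) then (if 0 < PySem.Int.floordiv (a : Int) Nx then 1 else 0) else 0) := by
  unfold gB
  rw [if_pos rfl]

lemma gB_offdiag (Nx Ny : Int) (k a b : Nat) (hab : a ≠ b) :
    gB Nx Ny k a b = if min a b < k then entryA Nx Ny a b else 0 := by
  unfold gB
  rw [if_neg hab]

lemma ite_lt_succ_nat (x K : Nat) (X : Int) :
    (if x < K + 1 then X else 0) = (if x < K then X else 0) + (if x = K then X else 0) := by
  split_ifs <;> omega

lemma gB_diag_succ (Nx Ny : Int) (k a : Nat) :
    gB Nx Ny (k+1) a a = gB Nx Ny k a a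
      + (if (a : Int) = (k : Int) then
            (if PySem.Int.mod (a : Int) Nx < Nx - 1 then 1 else 0) +
            (if PySem.Int.floordiv (a : Int) Nx < Ny - 1 then 1 else 0) else 0)
      + (if (a : Int) = (k : Int) + 1 then (if 0 < PySem.Int.mod (a : Int) Nx then 1 else 0) else 0)
      + (if (a : Int) = (k : Int) + Nx then (if 0 < PySem.Int.floordiv (a : Int) Nx then 1 else 0) else 0) := by
  rw [gB_diag, gB_diag]
  have hc : ((k+1 : Nat) : Int) = (k : Int) + 1 := by push_cast; ring
  rw [hc, ite_lt_succ, ite_lt_succ, ite_lt_succ, ite_eq_shift, ite_eq_shift]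
  ring

lemma gB_offdiag_succ (Nx Ny : Int) (k a b : Nat) (hab : a ≠ b) :
    gB Nx Ny (k+1) a b = gB Nx Ny k a b
      + (if min a b = k then entryA Nx Ny a b else 0) := by
  rw [gB_offdiag Nx Ny (k+1) a b hab, gB_offdiag Nx Ny k a b hab, ite_lt_succ_nat]

lemma eUpd_diag (g : Nat → Nat → Int) (i j a : Nat) (hij : i ≠ j) :
    eUpd g i j a a = g a a + (if a = i then 1 else 0) + (if a = j then 1 else 0) := by
  unfold eUpd
  by_cases h1 : a = i
  · subst h1
    rw [if_pos ⟨rfl, rfl⟩, if_pos rfl, if_neg hij]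
    ring
  · by_cases h2 : a = j
    · subst h2
      rw [if_neg (fun hc => h1 hc.1), if_pos ⟨rfl, rfl⟩, if_neg h1, if_pos rfl]
      ring
    · rw [if_neg (fun hc => h1 hc.1), if_neg (fun hc => h2 hc.1),
         if_neg (fun hc => hc.elim (fun h => h2 h.2) (fun h => h1 h.2)),
         if_neg h1, if_neg h2]
      ring

lemma eUpd_offdiag (g : Nat → Nat → Int) (i j a b : Nat) (hab : a ≠ b) :
    eUpd g i j a b = if (a = i ∧ b = j) ∨ (a = j ∧ b = i) then -1 else g a b := by
  unfold eUpd
  rw [if_neg (fun hc => hab (hc.1.trans hc.2.symm)), if_neg (fun hc => hab (hc.1.trans hc.2.symm))]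

-- which off-diagonal pairs carry a -1, phrased through B's edge conditions
lemma entry_off (Nx Ny : Int) (hNx : 0 < Nx) (hNy : 0 < Ny) (a b : Nat)
    (haN : ((a : Nat) : Int) < Nx*Ny) (_hbN : ((b : Nat) : Int) < Nx*Ny) (hab : a ≠ b) :
    entryA Nx Ny a b =
      if (PySem.Int.mod (a : Int) Nx < Nx - 1 ∧ (b : Int) = (a : Int) + 1) ∨
         (PySem.Int.floordiv (a : Int) Nx < Ny - 1 ∧ (b : Int) = (a : Int) + Nx) ∨
         (PySem.Int.mod (b : Int) Nx < Nx - 1 ∧ (a : Int) = (b : Int) + 1) ∨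
         (PySem.Int.floordiv (b : Int) Nx < Ny - 1 ∧ (a : Int) = (b : Int) + Nx)
      then -1 else 0 := by
  unfold entryA
  rw [if_neg (show ¬ b = a from fun h => hab h.symm)]
  refine if_congr ?_ rfl rfl
  rw [mem_nbrs]
  constructor
  · rintro (⟨hm, hb'⟩ | ⟨hm, hb'⟩ | ⟨hm, hb'⟩ | ⟨hm, hb'⟩)
    · obtain ⟨h1, h2⟩ := (left_iff Nx Ny _ hNx hNy (by positivity) haN).mp hm
      rw [← hb'] at h2
      exact Or.inr (Or.inr (Or.inl ⟨h2, by omega⟩))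
    · exact Or.inl ⟨hm, by omega⟩
    · obtain ⟨h1, h2⟩ := (bottom_iff Nx Ny _ hNx hNy (by positivity) haN).mp hm
      rw [← hb'] at h2
      exact Or.inr (Or.inr (Or.inr ⟨h2, by omega⟩))
    · exact Or.inr (Or.inl ⟨hm, by omega⟩)
  · rintro (⟨hm, hb'⟩ | ⟨hm, hb'⟩ | ⟨hm, hb'⟩ | ⟨hm, hb'⟩)
    · exact Or.inr (Or.inl ⟨hm, by omega⟩)
    · exact Or.inr (Or.inr (Or.inr ⟨hm, by omega⟩))
    · refine Or.inl ⟨(left_iff Nx Ny _ hNx hNy (by positivity) haN).mpr ⟨by omega, ?_⟩, by omega⟩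
      rw [show ((a : Nat) : Int) - 1 = (b : Int) from by omega]
      exact hm
    · refine Or.inr (Or.inr (Or.inl ⟨(bottom_iff Nx Ny _ hNx hNy (by positivity) haN).mpr
        ⟨by omega, ?_⟩, by omega⟩))
      rw [show ((a : Nat) : Int) - Nx = (b : Int) from by omega]
      exact hm

lemma gB_step (Nx Ny : Int) (N : Nat) (hNx : 0 < Nx) (hNy : 0 < Ny) (hNN : (N : Int) = Nx*Ny)
    (k : Nat) (hk : k < N) (a b : Nat) (ha : a < N) (hb : b < N) :
    stepG Nx Ny k (gB Nx Ny k) a b = gB Nx Ny (k+1) a b := by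
  have haN : ((a : Nat) : Int) < Nx*Ny := by rw [← hNN]; exact_mod_cast ha
  have hbN : ((b : Nat) : Int) < Nx*Ny := by rw [← hNN]; exact_mod_cast hb
  have hxe : (Nx.toNat : Int) = Nx := Int.toNat_of_nonneg hNx.le
  have hkK1 : k ≠ k + 1 := by omega
  have hkKx : k ≠ k + Nx.toNat := by omega
  unfold stepG
  by_cases hab : a = b
  · subst hab
    rw [gB_diag_succ]
    have hM : (if (a : Int) = (k : Int) + 1 then (if 0 < PySem.Int.mod (a : Int) Nx then (1:Int) else 0) else 0)
            = (if a = k + 1 then (if PySem.Int.mod (k : Int) Nx < Nx - 1 then (1:Int) else 0) else 0) := by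
      by_cases h : a = k + 1
      · rw [if_pos (by omega), if_pos h]
        refine if_congr ?_ rfl rfl
        rw [left_iff Nx Ny _ hNx hNy (by positivity) haN,
           show ((a : Nat) : Int) - 1 = (k : Int) from by omega]
        constructor
        · exact fun hh => hh.2
        · exact fun hh => ⟨by omega, hh⟩
      · rw [if_neg (by omega), if_neg h]
    have hF : (if (a : Int) = (k : Int) + Nx then (if 0 < PySem.Int.floordiv (a : Int) Nx then (1:Int) else 0) else 0)
            = (if a = k + Nx.toNat then (if PySem.Int.floordiv (k : Int) Nx < Ny - 1 then (1:Int) else 0) else 0) := by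
      by_cases h : a = k + Nx.toNat
      · rw [if_pos (by omega), if_pos h]
        refine if_congr ?_ rfl rfl
        rw [bottom_iff Nx Ny _ hNx hNy (by positivity) haN,
           show ((a : Nat) : Int) - Nx = (k : Int) from by omega]
        constructor
        · exact fun hh => hh.2
        · exact fun hh => ⟨by omega, hh⟩
      · rw [if_neg (by omega), if_neg h]
    have hR : (if (a : Int) = (k : Int) then
            (if PySem.Int.mod (a : Int) Nx < Nx - 1 then (1:Int) else 0) +
            (if PySem.Int.floordiv (a : Int) Nx < Ny - 1 then (1:Int) else 0) else 0)
            = (if a = k then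
            (if PySem.Int.mod (k : Int) Nx < Nx - 1 then (1:Int) else 0) +
            (if PySem.Int.floordiv (k : Int) Nx < Ny - 1 then (1:Int) else 0) else 0) := by
      by_cases h : a = k
      · subst h
        rw [if_pos (show ((a : Nat) : Int) = ((a : Nat) : Int) from rfl), if_pos (show a = a from rfl)]
      · rw [if_neg (by omega), if_neg h]
    rw [hR, hM, hF]
    by_cases hr : PySem.Int.mod (k : Int) Nx < Nx - 1 <;>
      by_cases ht : PySem.Int.floordiv (k : Int) Nx < Ny - 1
    · rw [if_pos hr, if_pos ht, eUpd_diag _ _ _ _ hkKx, eUpd_diag _ _ _ _ hkK1]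
      simp only [hr, ht, if_true]
      split_ifs <;> omega
    · rw [if_pos hr, if_neg ht, eUpd_diag _ _ _ _ hkK1]
      simp only [hr, ht, if_true, if_false]
      split_ifs <;> omega
    · rw [if_neg hr, if_pos ht, eUpd_diag _ _ _ _ hkKx]
      simp only [hr, ht, if_true, if_false]
      split_ifs <;> omega
    · rw [if_neg hr, if_neg ht]
      simp only [hr, ht, if_false]
      split_ifs <;> omega
  · rw [gB_offdiag_succ Nx Ny k a b hab, entry_off Nx Ny hNx hNy a b haN hbN hab]
    by_cases hmin : min a b = k
    · rw [if_pos hmin]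
      have hg0 : gB Nx Ny k a b = 0 := by
        rw [gB_offdiag Nx Ny k a b hab, if_neg (by omega)]
      obtain ⟨hak, hkb⟩ | ⟨hbk, hka⟩ : (a = k ∧ k < b) ∨ (b = k ∧ k < a) := by omega
      · subst hak
        have hC3 : ¬ ((a : Int) = (b : Int) + 1) := by omega
        have hC4 : ¬ ((a : Int) = (b : Int) + Nx) := by omega
        by_cases hr : PySem.Int.mod (a : Int) Nx < Nx - 1 <;>
          by_cases ht : PySem.Int.floordiv (a : Int) Nx < Ny - 1 <;>
          [rw [if_pos hr, if_pos ht, eUpd_offdiag _ _ _ _ _ hab, eUpd_offdiag _ _ _ _ _ hab];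
           rw [if_pos hr, if_neg ht, eUpd_offdiag _ _ _ _ _ hab];
           rw [if_neg hr, if_pos ht, eUpd_offdiag _ _ _ _ _ hab];
           rw [if_neg hr, if_neg ht]] <;>
          rw [hg0] <;>
          simp only [hr, ht, hC3, hC4, true_and, and_true, false_and, and_false, or_false, false_or,
            if_false] <;>
          (first | (split_ifs <;> omega) | omega)
      · subst hbk
        have hC1 : ¬ ((b : Int) = (a : Int) + 1) := by omega
        have hC2 : ¬ ((b : Int) = (a : Int) + Nx) := by omega
        by_cases hr : PySem.Int.mod (b : Int) Nx < Nx - 1 <;>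
          by_cases ht : PySem.Int.floordiv (b : Int) Nx < Ny - 1 <;>
          [rw [if_pos hr, if_pos ht, eUpd_offdiag _ _ _ _ _ hab, eUpd_offdiag _ _ _ _ _ hab];
           rw [if_pos hr, if_neg ht, eUpd_offdiag _ _ _ _ _ hab];
           rw [if_neg hr, if_pos ht, eUpd_offdiag _ _ _ _ _ hab];
           rw [if_neg hr, if_neg ht]] <;>
          rw [hg0] <;>
          simp only [hr, ht, hC1, hC2, true_and, and_true, false_and, and_false, or_false, false_or,
            if_false] <;>
          (first | (split_ifs <;> omega) | omega)
    · rw [if_neg hmin]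
      have w1 : ¬ ((a = k ∧ b = k + 1) ∨ (a = k + 1 ∧ b = k)) := by omega
      have w2 : ¬ ((a = k ∧ b = k + Nx.toNat) ∨ (a = k + Nx.toNat ∧ b = k)) := by omega
      by_cases hr : PySem.Int.mod (k : Int) Nx < Nx - 1 <;>
        by_cases ht : PySem.Int.floordiv (k : Int) Nx < Ny - 1 <;>
        [rw [if_pos hr, if_pos ht, eUpd_offdiag _ _ _ _ _ hab, eUpd_offdiag _ _ _ _ _ hab,
            if_neg w2, if_neg w1];
         rw [if_pos hr, if_neg ht, eUpd_offdiag _ _ _ _ _ hab, if_neg w1];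
         rw [if_neg hr, if_pos ht, eUpd_offdiag _ _ _ _ _ hab, if_neg w2];
         rw [if_neg hr, if_neg ht]] <;>
        ring

lemma B_fold (Nx Ny : Int) (N : Nat) (hNx : 0 < Nx) (hNy : 0 < Ny) (hNN : (N : Int) = Nx*Ny)
    (k : Nat) (hk : k ≤ N) :
    (List.range k).foldl (fun A n => stepB Nx Ny A ((n : Nat) : Int)) (mkM N (gB Nx Ny 0))
    = mkM N (gB Nx Ny k) := by
  induction k with
  | zero => simp
  | succ k ih =>
    rw [List.range_succ, List.foldl_append, ih (by omega)]
    simp only [List.foldl_cons, List.foldl_nil]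
    rw [stepB_mk Nx Ny N hNx hNy hNN _ k (by omega)]
    exact mkM_congr (fun a b ha hb => gB_step Nx Ny N hNx hNy hNN k (by omega) a b ha hb)

lemma gB_zero (Nx Ny : Int) (N : Nat) (hNx : 0 < Nx) (_hNy : 0 < Ny) (_hNN : (N : Int) = Nx*Ny)
    (a b : Nat) (ha : a < N) (_hb : b < N) : gB Nx Ny 0 a b = 0 := by
  unfold gB
  by_cases ha0 : a = 0
  · subst ha0
    have hz := decomp_pos Nx 0 0 hNx (le_refl 0) hNx
    norm_num at hz
    simp only [Nat.cast_zero]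
    split_ifs <;> omega
  · have h1 : (1 : Int) ≤ (a : Int) := by exact_mod_cast Nat.one_le_iff_ne_zero.mpr ha0
    by_cases haN : (a : Int) < Nx
    · have hz := decomp_pos Nx 0 ((a : Nat) : Int) hNx (by positivity) haN
      norm_num at hz
      split_ifs <;> omega
    · split_ifs <;> omega

lemma B_init (Nx Ny : Int) (N : Nat) (hNN : (N : Int) = Nx*Ny) :
    pentadiagonal_alt Nx Ny
    = (List.range N).foldl (fun A n => stepB Nx Ny A ((n : Nat) : Int)) (mkM N (fun _ _ => 0)) := by
  rw [pentadiagonal_alt_eq_foldl, show Nx*Ny = ((N : Nat) : Int) from hNN.symm,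
     PySem.List.pyRange_zero_natCast, List.foldl_map]
  congr 1
  simp [mkM, PySem.List.pyRepeat_singleton, Function.comp_def, List.map_const']

lemma B_result_pos (Nx Ny : Int) (N : Nat) (hNx : 0 < Nx) (hNy : 0 < Ny)
    (hNN : (N : Int) = Nx*Ny) :
    pentadiagonal_alt Nx Ny = mkM N (gB Nx Ny N) := by
  rw [B_init Nx Ny N hNN,
     show mkM N (fun _ _ => (0:Int)) = mkM N (gB Nx Ny 0) from
       mkM_congr (fun a b ha hb => (gB_zero Nx Ny N hNx hNy hNN a b ha hb).symm)]
  exact B_fold Nx Ny N hNx hNy hNN N (le_refl N)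

-- final pointwise match in the positive case
lemma final_pos (Nx Ny : Int) (N : Nat) (hNx : 0 < Nx) (hNy : 0 < Ny) (hNN : (N : Int) = Nx*Ny)
    (a b : Nat) (ha : a < N) (hb : b < N) : entryA Nx Ny a b = gB Nx Ny N a b := by
  have ha0 : (0 : Int) ≤ (a : Int) := by positivity
  have haN : ((a : Nat) : Int) < Nx*Ny := by rw [← hNN]; exact_mod_cast ha
  by_cases hab : a = b
  · subst hab
    rw [gB_diag]
    rw [if_pos (show (a : Int) < (N : Int) by exact_mod_cast ha),
       if_pos (show (a : Int) - 1 < (N : Int) by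
         have : ((a : Nat) : Int) < (N : Int) := by exact_mod_cast ha
         omega),
       if_pos (show (a : Int) - Nx < (N : Int) by
         have : ((a : Nat) : Int) < (N : Int) := by exact_mod_cast ha
         omega)]
    unfold entryA
    rw [if_neg (by
      rw [mem_nbrs]
      push Not
      refine ⟨fun _ => by omega, fun _ => by omega, fun _ => by omega, fun _ => by omega⟩)]
    rw [if_pos rfl, len_nbrs]
    split_ifs <;> omega
  · rw [gB_offdiag Nx Ny N a b hab, if_pos (show min a b < N by omega)]

-- negative×negative grids: B's loop never fires
lemma stepB_id_neg (Nx Ny : Int) (N : Nat) (hNx : Nx < 0) (hNN : (N : Int) = Nx*Ny)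
    (A : List (List Int)) (k : Nat) (hk : k < N) : stepB Nx Ny A (k : Int) = A := by
  have h1 : ((k : Int)) < Nx*Ny := by rw [← hNN]; exact_mod_cast hk
  obtain ⟨-, n2, -, n4⟩ := neg_conds Nx Ny (k : Int) hNx (by positivity) h1
  unfold stepB
  dsimp only
  rw [if_neg n2, if_neg n4]

lemma B_result_neg (Nx Ny : Int) (N : Nat) (hNx : Nx < 0) (_hNy : Ny < 0)
    (hNN : (N : Int) = Nx*Ny) :
    pentadiagonal_alt Nx Ny = mkM N (fun _ _ => 0) := by
  rw [B_init Nx Ny N hNN]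
  have : ∀ k : Nat, k ≤ N →
      (List.range k).foldl (fun A n => stepB Nx Ny A ((n : Nat) : Int)) (mkM N (fun _ _ => 0))
      = mkM N (fun _ _ => 0) := by
    intro k hk
    induction k with
    | zero => simp
    | succ k ih =>
      rw [List.range_succ, List.foldl_append, ih (by omega)]
      simp only [List.foldl_cons, List.foldl_nil]
      exact stepB_id_neg Nx Ny N hNx hNN _ k (by omega)
  exact this N (le_refl N)

lemma main_eq (Nx Ny : Int) : pentadiagonal Nx Ny = pentadiagonal_alt Nx Ny := by
  by_cases h : Nx*Ny ≤ 0
  · rw [A_result]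
    rw [pentadiagonal_alt_eq_foldl]
    rw [show PySem.List.pyRange 0 (Nx*Ny) = [] from by
      rw [PySem.List.pyRange_of_pos (a:=0) (b:=Nx*Ny) (s:=1) (by omega)]
      simp
      omega]
    simp [mkM, show (Nx*Ny).toNat = 0 from by omega]
  · rw [not_le] at h
    set N := (Nx*Ny).toNat with hN
    have hNN : (N : Int) = Nx*Ny := by omega
    rcases mul_pos_iff.mp h with ⟨hNx, hNy⟩ | ⟨hNx, hNy⟩
    · rw [A_result, ← hN, B_result_pos Nx Ny N hNx hNy hNN]
      exact mkM_congr (fun a b ha hb => final_pos Nx Ny N hNx hNy hNN a b ha hb)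
    · rw [A_result, ← hN, B_result_neg Nx Ny N hNx hNy hNN]
      apply mkM_congr
      intro a b ha _
      have h1 : ((a : Int)) < Nx*Ny := by rw [← hNN]; exact_mod_cast ha
      obtain ⟨hnil, hzero⟩ := nbrs_neg Nx Ny (a : Int) hNx (by positivity) h1
      unfold entryA
      rw [hnil]
      simp [hzero]

-- ===== VERDICT (by name: the statement is the Claim_ definition above) =====
theorem pentadiagonal_spec : Claim_equal_pentadiagonal := by
  intro Nx Ny _
  unfold Spec_pentadiagonal
  exact main_eq Nx Ny
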